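-- pv_equiv track=rewrite | github.com/TK-Bunga-Matahari/shinchan | project1_task-management/solution/competency_assesment/competency_assessment.py | top_score
-- ===== SOURCE A (Python) =====
-- import heapq
--
-- def top_score(score):
--     assigned_tasks = {}
--     task_assignment = {talent: {} for talent in score}
--     all_tasks = {task for tasks in score.values() for task in tasks}
--     remaining_tasks = all_tasks.copy()
--     talent_heap = []
--
--     # Initialize heap with talents and their max scores
--     for talent in score:
--         heapq.heappush(talent_heap, (-max(score[talent].values()), talent))
--
--     # Assign tasks based on highest scores first
--     while talent_heap and remaining_tasks:
--         _, talent = heapq.heappop(talent_heap)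
--         for task, task_score in sorted(
--             score[talent].items(), key=lambda item: item[1], reverse=True
--         ):
--             if task in remaining_tasks and task_score >= 0:
--                 task_assignment[talent][task] = task_score
--                 assigned_tasks[task] = (talent, task_score)
--                 remaining_tasks.remove(task)
--                 break
--
--     # Ensure every talent has at least one task
--     for talent in score:
--         if not task_assignment[talent]:
--             for task, task_score in sorted(
--                 score[talent].items(), key=lambda item: item[1], reverse=True
--             ):
--                 if task not in assigned_tasks:
--                     task_assignment[talent][task] = task_score
--                     assigned_tasks[task] = (talent, task_score)
--                     remaining_tasks.remove(task)
--                     break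
--
--     # Assign remaining tasks (including those with scores < 0)
--     while remaining_tasks:
--         for talent in score:
--             if not remaining_tasks:
--                 break
--             for task, task_score in sorted(
--                 score[talent].items(), key=lambda item: item[1], reverse=True
--             ):
--                 if task in remaining_tasks:
--                     task_assignment[talent][task] = task_score
--                     assigned_tasks[task] = (talent, task_score)
--                     remaining_tasks.remove(task)
--                     break
--
--     return task_assignment
-- ===== SOURCE B (Python) =====
-- def top_score(score):
--     # Precompute each talent's score-sorted task list once; per-talent pointers
--     # replace A's repeated re-sorting and rescanning.
--     order = {t: sorted(score[t].items(), key=lambda item: item[1], reverse=True)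
--              for t in score}
--     talents = [t for _, t in sorted((-max(score[t].values()), t) for t in score)]
--     remaining = {task for tasks in score.values() for task in tasks}
--     result = {t: {} for t in score}
--     pos = {t: 0 for t in score}
--
--     # Phase 1: talents in order of highest max score take their best task (>= 0).
--     for t in talents:
--         if not remaining:
--             break
--         lst = order[t]
--         n = len(lst)
--         i = pos[t]
--         while i < n and lst[i][0] not in remaining:
--             i += 1
--         pos[t] = i
--         if i < n:
--             task, s = lst[i]
--             if s >= 0:
--                 result[t][task] = s
--                 remaining.remove(task)
--
--     # Phase 2: every still-empty talent takes its best unassigned task, if any.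
--     for t in score:
--         if not result[t]:
--             lst = order[t]
--             n = len(lst)
--             i = pos[t]
--             while i < n and lst[i][0] not in remaining:
--                 i += 1
--             pos[t] = i
--             if i < n:
--                 task, s = lst[i]
--                 result[t][task] = s
--                 remaining.remove(task)
--
--     # Phase 3: round-robin over talents until nothing remains.
--     while remaining:
--         for t in score:
--             if not remaining:
--                 break
--             lst = order[t]
--             n = len(lst)
--             i = pos[t]
--             while i < n and lst[i][0] not in remaining:
--                 i += 1
--             pos[t] = i
--             if i < n:
--                 task, s = lst[i]
--                 result[t][task] = s
--                 remaining.remove(task)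
--
--     return result
-- ===== Notes on version B (the rewrite author's own statement) =====
-- stated objective: alternative
-- what changed: B replaces A's heap and its per-visit re-sorting and full rescans of each talent's task dict by a talent list sorted once by (-max score, talent), per-talent score-sorted task lists computed once up front, and monotone per-talent pointers that skip already-assigned tasks, removing the repeated sorting/rescanning (asymptotically better on rescan-heavy inputs, though a timing run's random family did not confirm a >=1.5x speed-up).
-- outside the precondition, e.g. on top_score({'a': {}}): A raises ValueError, B raises ValueError
import Mathlib
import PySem

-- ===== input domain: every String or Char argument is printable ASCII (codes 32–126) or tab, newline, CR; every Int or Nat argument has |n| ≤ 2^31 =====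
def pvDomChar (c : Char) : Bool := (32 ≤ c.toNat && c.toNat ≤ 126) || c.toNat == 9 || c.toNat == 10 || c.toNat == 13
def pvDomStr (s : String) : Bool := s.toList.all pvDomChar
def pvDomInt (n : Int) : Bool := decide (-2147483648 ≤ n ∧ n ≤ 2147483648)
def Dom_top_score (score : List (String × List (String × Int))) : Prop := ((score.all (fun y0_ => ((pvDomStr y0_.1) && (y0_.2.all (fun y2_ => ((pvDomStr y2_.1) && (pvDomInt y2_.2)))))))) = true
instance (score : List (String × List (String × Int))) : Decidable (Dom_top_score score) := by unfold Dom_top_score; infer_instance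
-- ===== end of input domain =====

-- B replaces A's heap and its per-visit re-sorting/re-scanning by a once-sorted talent list,
-- per-talent score-sorted task lists computed once, and monotone per-talent pointers
-- (objective: alternative — it removes A's repeated sorting work; a timing run did not
-- confirm a >=1.5x speed-up on its random input family, so no speed is claimed).


-- ===== PORT A =====
-- shared boundary conversion: the Python argument IS a dict of dicts
def pyDictOfScore (score : List (String × List (String × Int))) : PySem.Dict String (PySem.Dict String Int) :=
  PySem.Dict.ofList (score.map (fun p => (p.1, PySem.Dict.ofList p.2)))

-- sorted(score[talent].items(), key=lambda item: item[1], reverse=True)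
def itemsDesc (d : PySem.Dict String Int) : List (String × Int) :=
  PySem.List.sorted d.items (fun item => item.2) true

-- {task for tasks in score.values() for task in tasks}
def allTasksOf (sc : PySem.Dict String (PySem.Dict String Int)) : PySem.Set String :=
  PySem.Set.ofList (sc.values.flatMap (fun d => d.keys))

-- {talent: {} for talent in score}
def emptyRowsOf (sc : PySem.Dict String (PySem.Dict String Int)) : PySem.Dict String (PySem.Dict String Int) :=
  sc.keys.foldl (fun d t => d.insert t PySem.Dict.empty) PySem.Dict.empty

-- (-max(score[talent].values()), talent); max of an empty dict raises ValueError → excluded by Pre_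
def tupOf (sc : PySem.Dict String (PySem.Dict String Int)) (t : String) : Int × String :=
  (-(PySem.List.maxD (sc.getD t PySem.Dict.empty).values (fun v => v) 0), t)

-- Python's '<' on (int, str) tuples (lexicographic)
def pyTupBefore (a b : Int × String) : Bool :=
  decide (a.1 < b.1) || (!decide (b.1 < a.1) && decide (a.2 < b.2))

structure StA where
  assigned : PySem.Dict String (String × Int)
  ta : PySem.Dict String (PySem.Dict String Int)
  rem : PySem.Set String

-- the heapq heap is modeled as an ordered list: heappush = ordered insert, heappop = take the head.
-- Exact here: all pushes precede all pops and the pushed tuples are pairwise distinct (talents are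
-- distinct dict keys), so heappop yields them in exactly ascending tuple order.
def heapOf (sc : PySem.Dict String (PySem.Dict String Int)) : List (Int × String) :=
  sc.keys.foldl (fun h t => PySem.List.insertBy pyTupBefore (tupOf sc t) h) []

-- task_assignment[talent][task] = s; assigned_tasks[task] = (talent, s); remaining_tasks.remove(task)
-- (remove cannot raise: every call site has just checked the task is present in remaining)
def assignA (talent task : String) (s : Int) (st : StA) : StA :=
  { assigned := st.assigned.insert task (talent, s),
    ta := st.ta.modify talent PySem.Dict.empty (fun row => row.insert task s),
    rem := st.rem.discard task }

-- body of the first while loop, for one popped talent (the for-with-break scan is find?)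
def stepA1 (sc : PySem.Dict String (PySem.Dict String Int)) (st : StA) (talent : String) : StA :=
  match (itemsDesc (sc.getD talent PySem.Dict.empty)).find?
      (fun it => st.rem.contains it.1 && decide (it.2 ≥ 0)) with
  | some it => assignA talent it.1 it.2 st
  | none => st

-- while talent_heap and remaining_tasks: pop and process
def loopA1 (sc : PySem.Dict String (PySem.Dict String Int)) :
    List (Int × String) → StA → StA
  | [], st => st
  | e :: hs, st => if st.rem = [] then st else loopA1 sc hs (stepA1 sc st e.2)

-- second for loop: talents with no task yet
def stepA2 (sc : PySem.Dict String (PySem.Dict String Int)) (st : StA) (talent : String) : StA :=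
  if (st.ta.getD talent PySem.Dict.empty).items = [] then
    match (itemsDesc (sc.getD talent PySem.Dict.empty)).find?
        (fun it => !st.assigned.contains it.1) with
    | some it => assignA talent it.1 it.2 st
    | none => st
  else st

-- body of the final while loop, for one talent of one pass
def stepA3 (sc : PySem.Dict String (PySem.Dict String Int)) (st : StA) (talent : String) : StA :=
  if st.rem = [] then st
  else
    match (itemsDesc (sc.getD talent PySem.Dict.empty)).find?
        (fun it => st.rem.contains it.1) with
    | some it => assignA talent it.1 it.2 st
    | none => st

-- while remaining_tasks: one pass over score per iteration.  fuel = |remaining|+1 is enough: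
-- every remaining task is a key of some talent's dict, so each pass with remaining ≠ ∅ removes ≥ 1 task.
def loopA3 (sc : PySem.Dict String (PySem.Dict String Int)) : Nat → StA → StA
  | 0, st => st
  | fuel + 1, st =>
      if st.rem = [] then st else loopA3 sc fuel (sc.keys.foldl (stepA3 sc) st)

def top_score (score : List (String × List (String × Int))) : List (String × List (String × Int)) :=
  let sc := pyDictOfScore score
  let st0 : StA := ⟨PySem.Dict.empty, emptyRowsOf sc, allTasksOf sc⟩
  let st1 := loopA1 sc (heapOf sc) st0
  let st2 := sc.keys.foldl (stepA2 sc) st1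
  let st3 := loopA3 sc (st2.rem.length + 1) st2
  st3.ta.items.map (fun p => (p.1, p.2.items))

-- ===== PORT B =====
structure StB where
  res : PySem.Dict String (PySem.Dict String Int)
  rem : PySem.Set String
  pos : PySem.Dict String Nat

-- order = {t: sorted(score[t].items(), key=..., reverse=True) for t in score}
def ordersOf (sc : PySem.Dict String (PySem.Dict String Int)) :
    PySem.Dict String (List (String × Int)) :=
  sc.keys.foldl (fun d t => d.insert t (itemsDesc (sc.getD t PySem.Dict.empty))) PySem.Dict.empty

-- talents = [t for _, t in sorted((-max(score[t].values()), t) for t in score)]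
def talentsOf (sc : PySem.Dict String (PySem.Dict String Int)) : List String :=
  (PySem.List.sorted2 (sc.keys.map (tupOf sc)) Prod.fst Prod.snd).map Prod.snd

-- the while loop inside advance(t); the index is a Nat (it is a non-negative Python int)
def advanceIdx (lst : List (String × Int)) (rem : PySem.Set String) (i : Nat) : Nat :=
  if h : i < lst.length then
    (if rem.contains lst[i].1 then i else advanceIdx lst rem (i + 1))
  else i
termination_by lst.length - i

-- take(t) at pointer j: result[t][task] = s; remaining.remove(task)
def takeAt (lst : List (String × Int)) (j : Nat) (t : String) (st : StB) : StB :=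
  match lst[j]? with
  | some it =>
      { st with
        res := st.res.insert t ((st.res.getD t PySem.Dict.empty).insert it.1 it.2),
        rem := st.rem.discard it.1 }
  | none => st

-- phase 1 body: advance(t), then assign only a non-negative best task
def stepB1 (ords : PySem.Dict String (List (String × Int))) (st : StB) (t : String) : StB :=
  let lst := ords.getD t []
  let j := advanceIdx lst st.rem (st.pos.getD t 0)
  let st' : StB := { st with pos := st.pos.insert t j }
  match lst[j]? with
  | some it => if it.2 ≥ 0 then takeAt lst j t st' else st'
  | none => st'

def loopB1 (ords : PySem.Dict String (List (String × Int))) : List String → StB → StB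
  | [], st => st
  | t :: ts, st => if st.rem = [] then st else loopB1 ords ts (stepB1 ords st t)

-- phase 2 body: a still-empty talent takes its best unassigned task, if any
def stepB2 (ords : PySem.Dict String (List (String × Int))) (st : StB) (t : String) : StB :=
  if (st.res.getD t PySem.Dict.empty).items = [] then
    let lst := ords.getD t []
    let j := advanceIdx lst st.rem (st.pos.getD t 0)
    let st' : StB := { st with pos := st.pos.insert t j }
    if j < lst.length then takeAt lst j t st' else st'
  else st

-- phase 3 body, one talent of one round-robin pass
def stepB3 (ords : PySem.Dict String (List (String × Int))) (st : StB) (t : String) : StB :=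
  if st.rem = [] then st
  else
    let lst := ords.getD t []
    let j := advanceIdx lst st.rem (st.pos.getD t 0)
    let st' : StB := { st with pos := st.pos.insert t j }
    if j < lst.length then takeAt lst j t st' else st'

-- while remaining: same fuel bound as in port A (each nonempty pass removes ≥ 1 task)
def loopB3 (ords : PySem.Dict String (List (String × Int))) (keys : List String) :
    Nat → StB → StB
  | 0, st => st
  | fuel + 1, st =>
      if st.rem = [] then st else loopB3 ords keys fuel (keys.foldl (stepB3 ords) st)

def top_score_alt (score : List (String × List (String × Int))) : List (String × List (String × Int)) :=
  let sc := pyDictOfScore score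
  let ords := ordersOf sc
  let st0 : StB := ⟨emptyRowsOf sc, allTasksOf sc,
    sc.keys.foldl (fun d t => d.insert t 0) PySem.Dict.empty⟩
  let st1 := loopB1 ords (talentsOf sc) st0
  let st2 := sc.keys.foldl (stepB2 ords) st1
  let st3 := loopB3 ords sc.keys (st2.rem.length + 1) st2
  st3.res.items.map (fun p => (p.1, p.2.items))

-- ===== PRECONDITION & SPEC =====
-- Pre_ excludes inputs whose dict has a talent with an empty task dict: there Python's
-- max(score[talent].values()) raises ValueError (A returns nothing).
def Pre_top_score (score : List (String × List (String × Int))) : Prop :=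
  ∀ d ∈ (pyDictOfScore score).values, d.items ≠ []
instance (score : List (String × List (String × Int))) : Decidable (Pre_top_score score) := by
  unfold Pre_top_score; infer_instance

def pvWitness_top_score : (List (String × List (String × Int))) :=
  [("a", [("x", 2), ("y", -1)]), ("b", [("x", 3)])]

def Spec_top_score (score : List (String × List (String × Int))) (out : List (String × List (String × Int))) : Prop := out = top_score_alt score
instance (score : List (String × List (String × Int))) (out : List (String × List (String × Int))) : Decidable (Spec_top_score score out) := by unfold Spec_top_score; infer_instance

-- ===== CLAIM (what is proved, stated in full; the proofs are below) =====
def Claim_equal_top_score : Prop := ∀ (score : List (String × List (String × Int))), Dom_top_score score → Pre_top_score score → Spec_top_score score (top_score score)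

-- ===== LEMMAS AND PROOFS =====

-- the simulation invariant between A's and B's loop states
def ordOf (sc : PySem.Dict String (PySem.Dict String Int)) (t : String) : List (String × Int) :=
  itemsDesc (sc.getD t PySem.Dict.empty)

def SimInv (sc : PySem.Dict String (PySem.Dict String Int)) (stA : StA) (stB : StB) : Prop :=
  stA.ta = stB.res ∧ stA.rem = stB.rem ∧
  (∀ t, ∀ p ∈ (ordOf sc t).take (stB.pos.getD t 0), stB.rem.contains p.1 = false) ∧
  (∀ task, stA.assigned.contains task =
    ((allTasksOf sc).contains task && !stB.rem.contains task))

theorem contains_discard {s : PySem.Set String} {x y : String} :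
    (s.discard x).contains y = (s.contains y && !(y == x)) := by
  simp [PySem.Set.discard, PySem.Set.contains, List.mem_filter]
  by_cases h : y = x <;> simp [h]

theorem find?_congr_mem {α : Type} {l : List α} {p q : α → Bool}
    (h : ∀ x ∈ l, p x = q x) : l.find? p = l.find? q := by
  induction l with
  | nil => rfl
  | cons x xs ih =>
      simp only [List.find?]
      rw [h x (by simp)]
      cases q x
      · exact ih (fun y hy => h y (by simp [hy]))
      · rfl

theorem advanceIdx_spec (lst : List (String × Int)) (rem : PySem.Set String) (i : Nat)
    (hpre : ∀ p ∈ lst.take i, rem.contains p.1 = false) :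
    (∀ p ∈ lst.take (advanceIdx lst rem i), rem.contains p.1 = false) ∧
    (∀ h : advanceIdx lst rem i < lst.length,
      rem.contains (lst[advanceIdx lst rem i]'h).1 = true) := by
  rw [advanceIdx]
  split
  · next h =>
    split
    · next hc => exact ⟨hpre, fun _ => hc⟩
    · next hc =>
      refine advanceIdx_spec lst rem (i + 1) ?_
      intro p hp
      rw [List.take_add_one] at hp
      rcases List.mem_append.1 hp with h1 | h2
      · exact hpre p h1
      · rw [List.getElem?_eq_getElem h] at h2
        simp only [Option.toList_some, List.mem_singleton] at h2
        subst h2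
        simpa using hc
  · next h => exact ⟨hpre, fun h' => absurd h' h⟩
termination_by lst.length - i
decreasing_by omega

theorem find?_at (lst : List (String × Int)) (rem : PySem.Set String) (j : Nat)
    (h1 : ∀ p ∈ lst.take j, rem.contains p.1 = false)
    (h2 : ∀ h : j < lst.length, rem.contains (lst[j]'h).1 = true) :
    lst.find? (fun p => rem.contains p.1) = lst[j]? := by
  induction lst generalizing j with
  | nil => simp
  | cons x xs ih =>
      cases j with
      | zero =>
          have hx : rem.contains x.1 = true := h2 (by simp)
          simp at hx
          simp [hx]
      | succ j =>
          have hx : rem.contains x.1 = false := h1 x (by simp [List.take_succ_cons])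
          simp at hx
          rw [List.find?_cons_of_neg (by simp [hx])]
          simpa using ih j (fun p hp => h1 p (by simp [List.take_succ_cons, hp]))
            (fun h => by simpa using h2 (by simpa using Nat.succ_lt_succ h))

theorem find?_desc (lst : List (String × Int)) (rem : PySem.Set String)
    (hs : lst.Pairwise (fun a b => b.2 ≤ a.2)) :
    lst.find? (fun p => rem.contains p.1 && decide (p.2 ≥ 0)) =
      (match lst.find? (fun p => rem.contains p.1) with
        | some p => if p.2 ≥ 0 then some p else none
        | none => none) := by
  induction lst with
  | nil => simp
  | cons x xs ih =>
      rcases List.pairwise_cons.1 hs with ⟨hx, htail⟩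
      by_cases hcx : x.1 ∈ rem
      · have hrhs : List.find? (fun p : String × Int => rem.contains p.1) (x :: xs) = some x :=
          List.find?_cons_of_pos (by simp [hcx])
        rw [hrhs]
        by_cases hge : x.2 ≥ 0
        · rw [List.find?_cons_of_pos (by simp [hcx, hge])]
          simp [hge]
        · rw [List.find?_cons_of_neg (by simp [hge])]
          have hnone : xs.find? (fun p => rem.contains p.1 && decide (p.2 ≥ 0)) = none := by
            rw [List.find?_eq_none]
            intro p hp
            have := hx p hp
            simp only [Bool.and_eq_true, decide_eq_true_eq]
            rintro ⟨-, hp0⟩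
            omega
          rw [hnone]
          simp [hge]
      · have hrhs : List.find? (fun p : String × Int => rem.contains p.1) (x :: xs) =
            List.find? (fun p : String × Int => rem.contains p.1) xs :=
          List.find?_cons_of_neg (by simp [hcx])
        rw [hrhs, List.find?_cons_of_neg (by simp [hcx])]
        exact ih htail

theorem find?_tab {ν : Type} (ks : List String) (f : String → ν) (t : String) (ht : t ∈ ks) :
    List.find? (fun p => p.1 == t) (ks.map (fun k => (k, f k))) = some (t, f t) := by
  induction ks with
  | nil => simp at ht
  | cons k ks ih =>
      by_cases hk : k = t
      · subst hk; simp
      · rw [List.map_cons, List.find?_cons_of_neg (by simpa using hk)]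
        exact ih ((List.mem_cons.1 ht).resolve_left (fun h => hk h.symm))

theorem build_items {ν : Type} (ks : List String) (f : String → ν) (hnd : ks.Nodup) :
    (ks.foldl (fun d k => d.insert k (f k)) PySem.Dict.empty).items =
      ks.map (fun k => (k, f k)) := by
  have := PySem.Dict.items_foldl_insert_fresh ks (fun k => k) f PySem.Dict.empty
    (fun a _ => rfl) (by simpa using hnd)
  simpa using this

theorem build_getD {ν : Type} (ks : List String) (f : String → ν) (hnd : ks.Nodup)
    (t : String) (dflt : ν) (ht : t ∈ ks) :
    (ks.foldl (fun d k => d.insert k (f k)) PySem.Dict.empty).getD t dflt = f t := by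
  simp only [PySem.Dict.getD, PySem.Dict.get?, build_items ks f hnd, find?_tab ks f t ht]
  rfl

theorem pos0_getD (ks : List String) (d : PySem.Dict String Nat)
    (hd : ∀ t, d.getD t 0 = 0) (t : String) :
    (ks.foldl (fun d t => d.insert t 0) d).getD t 0 = 0 := by
  induction ks generalizing d with
  | nil => exact hd t
  | cons k ks ih =>
      refine ih (d.insert k 0) (fun t' => ?_)
      by_cases h : t' = k
      · subst h; exact PySem.Dict.getD_insert_self d t' 0 0
      · rw [PySem.Dict.getD_insert_of_ne d 0 0 h]; exact hd t'

theorem nodup_keys_pyDict (score : List (String × List (String × Int))) :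
    (pyDictOfScore score).keys.Nodup := by
  have := PySem.Dict.nodup_keys_foldl_insert_key
    (score.map (fun p => (p.1, PySem.Dict.ofList p.2))) Prod.fst (fun _ x => x.2)
    PySem.Dict.empty (by simp [PySem.Dict.empty, PySem.Dict.keys])
  simpa [pyDictOfScore, PySem.Dict.ofList, PySem.Dict.update] using this

theorem mem_allTasks (sc : PySem.Dict String (PySem.Dict String Int)) (t : String)
    (ht : t ∈ sc.keys) (p : String × Int) (hp : p ∈ (sc.getD t PySem.Dict.empty).items) :
    (allTasksOf sc).contains p.1 = true := by
  rcases List.mem_map.1 ht with ⟨q, hq, hq1⟩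
  have hfind : (sc.items.find? (fun r => r.1 == t)).isSome = true :=
    List.find?_isSome.2 ⟨q, hq, by simp [hq1]⟩
  rcases Option.isSome_iff_exists.1 hfind with ⟨r, hr⟩
  have hget : sc.getD t PySem.Dict.empty = r.2 := by
    simp [PySem.Dict.getD, PySem.Dict.get?, hr]
  have hrmem : r ∈ sc.items := List.mem_of_find?_eq_some hr
  rw [PySem.Set.contains_iff]
  rw [allTasksOf, PySem.Set.mem_ofList]
  refine List.mem_flatMap.2 ⟨r.2, List.mem_map.2 ⟨r, hrmem, rfl⟩, ?_⟩
  rw [← hget]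
  exact List.mem_map.2 ⟨p, hp, rfl⟩

theorem ords_getD (sc : PySem.Dict String (PySem.Dict String Int)) (hnd : sc.keys.Nodup)
    (t : String) (ht : t ∈ sc.keys) :
    (ordersOf sc).getD t [] = ordOf sc t :=
  build_getD sc.keys _ hnd t [] ht

theorem skip_inv (sc : PySem.Dict String (PySem.Dict String Int)) (stA : StA) (stB : StB)
    (t : String) (j : Nat)
    (hj1 : ∀ p ∈ (ordOf sc t).take j, stB.rem.contains p.1 = false)
    (hinv : SimInv sc stA stB) :
    SimInv sc stA { stB with pos := stB.pos.insert t j } := by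
  obtain ⟨hta, hrem, hpos, hass⟩ := hinv
  refine ⟨hta, hrem, ?_, hass⟩
  intro t' p hp
  by_cases h : t' = t
  · subst h
    rw [PySem.Dict.getD_insert_self] at hp
    exact hj1 p hp
  · rw [PySem.Dict.getD_insert_of_ne _ _ _ h] at hp
    exact hpos t' p hp

theorem assign_inv (sc : PySem.Dict String (PySem.Dict String Int)) (stA : StA) (stB : StB)
    (t : String) (it : String × Int) (j : Nat) (ht : t ∈ sc.keys)
    (hj : (ordOf sc t)[j]? = some it)
    (hj1 : ∀ p ∈ (ordOf sc t).take j, stB.rem.contains p.1 = false)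
    (hinv : SimInv sc stA stB) :
    SimInv sc (assignA t it.1 it.2 stA)
      (takeAt (ordOf sc t) j t { stB with pos := stB.pos.insert t j }) := by
  obtain ⟨hta, hrem, hpos, hass⟩ := hinv
  have hmem : it ∈ ordOf sc t := List.mem_of_getElem? hj
  have hitems : it ∈ (sc.getD t PySem.Dict.empty).items := by
    have := (PySem.List.mem_sorted (sc.getD t PySem.Dict.empty).items
      (fun item => item.2) true it).1
    exact this hmem
  have hall : (allTasksOf sc).contains it.1 = true := mem_allTasks sc t ht it hitems
  rw [takeAt, hj]
  refine ⟨?_, ?_, ?_, ?_⟩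
  · simp only [assignA, PySem.Dict.modify, hta]
  · simp only [assignA, hrem]
  · intro t' p hp
    simp only []
    rw [contains_discard]
    by_cases h : t' = t
    · subst h
      rw [PySem.Dict.getD_insert_self] at hp
      rw [hj1 p hp]
      rfl
    · rw [PySem.Dict.getD_insert_of_ne _ _ _ h] at hp
      rw [hpos t' p hp]
      rfl
  · intro task
    simp only [assignA]
    rw [PySem.Dict.contains_insert, contains_discard]
    by_cases h : task = it.1
    · subst h
      simp only [beq_self_eq_true, Bool.not_true, Bool.and_false, Bool.not_false,
        Bool.and_true, Bool.true_or]
      exact hall.symm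
    · have hb : (task == it.1) = false := by simpa using h
      rw [hb]
      simp only [Bool.false_or, Bool.not_false, Bool.and_true]
      rw [hass task]

theorem step1_eq (sc : PySem.Dict String (PySem.Dict String Int)) (hnd : sc.keys.Nodup)
    (stA : StA) (stB : StB) (t : String) (ht : t ∈ sc.keys)
    (hinv : SimInv sc stA stB) :
    SimInv sc (stepA1 sc stA t) (stepB1 (ordersOf sc) stB t) := by
  obtain ⟨hta, hrem, hpos, hass⟩ := hinv
  rw [stepA1, stepB1]
  simp only [ords_getD sc hnd t ht]
  rw [show itemsDesc (sc.getD t PySem.Dict.empty) = ordOf sc t from rfl]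
  obtain ⟨hj1, hj2⟩ := advanceIdx_spec (ordOf sc t) stB.rem (stB.pos.getD t 0) (hpos t)
  have hfind : (ordOf sc t).find? (fun p => stB.rem.contains p.1) =
      (ordOf sc t)[advanceIdx (ordOf sc t) stB.rem (stB.pos.getD t 0)]? :=
    find?_at _ _ _ hj1 hj2
  have hdesc : (ordOf sc t).find? (fun p => stB.rem.contains p.1 && decide (p.2 ≥ 0)) =
      (match (ordOf sc t).find? (fun p => stB.rem.contains p.1) with
        | some p => if p.2 ≥ 0 then some p else none
        | none => none) :=
    find?_desc _ _ (PySem.List.sorted_pairwise_rev _ _)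
  rw [hrem]
  show SimInv sc
    (match (ordOf sc t).find? (fun it => stB.rem.contains it.1 && decide (it.2 ≥ 0)) with
      | some it => assignA t it.1 it.2 stA
      | none => stA) _
  rw [hdesc, hfind]
  cases hj : (ordOf sc t)[advanceIdx (ordOf sc t) stB.rem (stB.pos.getD t 0)]? with
  | none =>
      exact skip_inv sc stA stB t _ hj1 ⟨hta, hrem, hpos, hass⟩
  | some it =>
      by_cases hge : it.2 ≥ 0
      · simp only [if_pos hge]
        exact assign_inv sc stA stB t it _ ht hj hj1 ⟨hta, hrem, hpos, hass⟩
      · simp only [if_neg hge]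
        exact skip_inv sc stA stB t _ hj1 ⟨hta, hrem, hpos, hass⟩

theorem step3_eq (sc : PySem.Dict String (PySem.Dict String Int)) (hnd : sc.keys.Nodup)
    (stA : StA) (stB : StB) (t : String) (ht : t ∈ sc.keys)
    (hinv : SimInv sc stA stB) :
    SimInv sc (stepA3 sc stA t) (stepB3 (ordersOf sc) stB t) := by
  obtain ⟨hta, hrem, hpos, hass⟩ := hinv
  rw [stepA3, stepB3]
  rw [hrem]
  by_cases hempty : stB.rem = []
  · simp only [if_pos hempty]
    exact ⟨hta, hrem, hpos, hass⟩
  · simp only [if_neg hempty, ords_getD sc hnd t ht]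
    rw [show itemsDesc (sc.getD t PySem.Dict.empty) = ordOf sc t from rfl]
    obtain ⟨hj1, hj2⟩ := advanceIdx_spec (ordOf sc t) stB.rem (stB.pos.getD t 0) (hpos t)
    have hfind : (ordOf sc t).find? (fun p => stB.rem.contains p.1) =
        (ordOf sc t)[advanceIdx (ordOf sc t) stB.rem (stB.pos.getD t 0)]? :=
      find?_at _ _ _ hj1 hj2
    rw [hfind]
    cases hj : (ordOf sc t)[advanceIdx (ordOf sc t) stB.rem (stB.pos.getD t 0)]? with
    | none =>
        have hlen : ¬ advanceIdx (ordOf sc t) stB.rem (stB.pos.getD t 0) < (ordOf sc t).length := by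
          intro hlt
          rw [List.getElem?_eq_getElem hlt] at hj
          simp at hj
        simp only [if_neg hlen]
        exact skip_inv sc stA stB t _ hj1 ⟨hta, hrem, hpos, hass⟩
    | some it =>
        have hlen : advanceIdx (ordOf sc t) stB.rem (stB.pos.getD t 0) < (ordOf sc t).length := by
          by_contra hlt
          rw [List.getElem?_eq_none (by omega)] at hj
          simp at hj
        simp only [if_pos hlen]
        exact assign_inv sc stA stB t it _ ht hj hj1 ⟨hta, hrem, hpos, hass⟩

theorem step2_eq (sc : PySem.Dict String (PySem.Dict String Int)) (hnd : sc.keys.Nodup)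
    (stA : StA) (stB : StB) (t : String) (ht : t ∈ sc.keys)
    (hinv : SimInv sc stA stB) :
    SimInv sc (stepA2 sc stA t) (stepB2 (ordersOf sc) stB t) := by
  obtain ⟨hta, hrem, hpos, hass⟩ := hinv
  rw [stepA2, stepB2]
  rw [hta]
  by_cases hempty : (stB.res.getD t PySem.Dict.empty).items = []
  · simp only [if_pos hempty, ords_getD sc hnd t ht]
    rw [show itemsDesc (sc.getD t PySem.Dict.empty) = ordOf sc t from rfl]
    have hcongr : (ordOf sc t).find? (fun it => !stA.assigned.contains it.1) =
        (ordOf sc t).find? (fun p => stB.rem.contains p.1) := by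
      apply find?_congr_mem
      intro p hp
      have hitems : p ∈ (sc.getD t PySem.Dict.empty).items :=
        (PySem.List.mem_sorted _ _ _ p).1 hp
      rw [hass p.1, mem_allTasks sc t ht p hitems]
      simp
    rw [hcongr]
    obtain ⟨hj1, hj2⟩ := advanceIdx_spec (ordOf sc t) stB.rem (stB.pos.getD t 0) (hpos t)
    have hfind : (ordOf sc t).find? (fun p => stB.rem.contains p.1) =
        (ordOf sc t)[advanceIdx (ordOf sc t) stB.rem (stB.pos.getD t 0)]? :=
      find?_at _ _ _ hj1 hj2
    rw [hfind]
    cases hj : (ordOf sc t)[advanceIdx (ordOf sc t) stB.rem (stB.pos.getD t 0)]? with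
    | none =>
        have hlen : ¬ advanceIdx (ordOf sc t) stB.rem (stB.pos.getD t 0) < (ordOf sc t).length := by
          intro hlt
          rw [List.getElem?_eq_getElem hlt] at hj
          simp at hj
        simp only [if_neg hlen]
        exact skip_inv sc stA stB t _ hj1 ⟨hta, hrem, hpos, hass⟩
    | some it =>
        have hlen : advanceIdx (ordOf sc t) stB.rem (stB.pos.getD t 0) < (ordOf sc t).length := by
          by_contra hlt
          rw [List.getElem?_eq_none (by omega)] at hj
          simp at hj
        simp only [if_pos hlen]
        exact assign_inv sc stA stB t it _ ht hj hj1 ⟨hta, hrem, hpos, hass⟩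
  · simp only [if_neg hempty]
    exact ⟨hta, hrem, hpos, hass⟩

theorem loop1_eq (sc : PySem.Dict String (PySem.Dict String Int)) (hnd : sc.keys.Nodup) :
    ∀ (hs : List (Int × String)) (stA : StA) (stB : StB),
      (∀ e ∈ hs, e.2 ∈ sc.keys) → SimInv sc stA stB →
      SimInv sc (loopA1 sc hs stA) (loopB1 (ordersOf sc) (hs.map Prod.snd) stB) := by
  intro hs
  induction hs with
  | nil => intro stA stB _ hinv; exact hinv
  | cons e hs ih =>
      intro stA stB hmem hinv
      rw [List.map_cons, loopA1, loopB1, hinv.2.1]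
      by_cases hempty : stB.rem = []
      · simp only [if_pos hempty]; exact hinv
      · simp only [if_neg hempty]
        exact ih _ _ (fun e' he' => hmem e' (by simp [he'])) 
          (step1_eq sc hnd _ _ e.2 (hmem e (by simp)) hinv)

theorem fold_eq (sc : PySem.Dict String (PySem.Dict String Int))
    (fA : StA → String → StA) (fB : StB → String → StB)
    (hstep : ∀ stA stB t, t ∈ sc.keys → SimInv sc stA stB → SimInv sc (fA stA t) (fB stB t)) :
    ∀ (ks : List String) (stA : StA) (stB : StB),
      (∀ t ∈ ks, t ∈ sc.keys) → SimInv sc stA stB →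
      SimInv sc (ks.foldl fA stA) (ks.foldl fB stB) := by
  intro ks
  induction ks with
  | nil => intro stA stB _ hinv; exact hinv
  | cons t ks ih =>
      intro stA stB hmem hinv
      rw [List.foldl_cons, List.foldl_cons]
      exact ih _ _ (fun t' ht' => hmem t' (by simp [ht']))
        (hstep _ _ t (hmem t (by simp)) hinv)

theorem loop3_eq (sc : PySem.Dict String (PySem.Dict String Int)) (hnd : sc.keys.Nodup) :
    ∀ (fuel : Nat) (stA : StA) (stB : StB), SimInv sc stA stB →
      SimInv sc (loopA3 sc fuel stA) (loopB3 (ordersOf sc) sc.keys fuel stB) := by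
  intro fuel
  induction fuel with
  | zero => intro stA stB hinv; exact hinv
  | succ fuel ih =>
      intro stA stB hinv
      rw [loopA3, loopB3, hinv.2.1]
      by_cases hempty : stB.rem = []
      · simp only [if_pos hempty]; exact hinv
      · simp only [if_neg hempty]
        exact ih _ _ (fold_eq sc _ _ (fun stA stB t ht hi => step3_eq sc hnd stA stB t ht hi)
          sc.keys _ _ (fun t ht => ht) hinv)

theorem heap_eq (sc : PySem.Dict String (PySem.Dict String Int)) :
    heapOf sc = PySem.List.sorted2 (sc.keys.map (tupOf sc)) Prod.fst Prod.snd := by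
  rw [heapOf, PySem.List.sorted2, List.foldl_map]
  rfl

theorem memheap (sc : PySem.Dict String (PySem.Dict String Int)) :
    ∀ e ∈ heapOf sc, e.2 ∈ sc.keys := by
  intro e he
  rw [heap_eq] at he
  have he2 : e ∈ sc.keys.map (tupOf sc) :=
    (PySem.List.sorted2_perm (sc.keys.map (tupOf sc)) Prod.fst Prod.snd false).subset he
  obtain ⟨t, htk, rfl⟩ := List.mem_map.1 he2
  exact htk

theorem talents_eq (sc : PySem.Dict String (PySem.Dict String Int)) :
    talentsOf sc = (heapOf sc).map Prod.snd := by
  rw [talentsOf, heap_eq]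

theorem inv0 (sc : PySem.Dict String (PySem.Dict String Int)) :
    SimInv sc ⟨PySem.Dict.empty, emptyRowsOf sc, allTasksOf sc⟩
      ⟨emptyRowsOf sc, allTasksOf sc,
        sc.keys.foldl (fun d t => d.insert t 0) PySem.Dict.empty⟩ := by
  refine ⟨rfl, rfl, ?_, ?_⟩
  · intro t p hp
    rw [pos0_getD sc.keys PySem.Dict.empty (fun _ => rfl) t] at hp
    simp at hp
  · intro task
    exact (Bool.and_not_self _).symm

theorem pipeline (sc : PySem.Dict String (PySem.Dict String Int)) (hnd : sc.keys.Nodup)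
    (stA : StA) (stB : StB) (hinv : SimInv sc stA stB) :
    (loopA3 sc ((sc.keys.foldl (stepA2 sc) (loopA1 sc (heapOf sc) stA)).rem.length + 1)
        (sc.keys.foldl (stepA2 sc) (loopA1 sc (heapOf sc) stA))).ta.items.map
      (fun p => (p.1, p.2.items)) =
    (loopB3 (ordersOf sc) sc.keys
        ((sc.keys.foldl (stepB2 (ordersOf sc))
            (loopB1 (ordersOf sc) ((heapOf sc).map Prod.snd) stB)).rem.length + 1)
        (sc.keys.foldl (stepB2 (ordersOf sc))
          (loopB1 (ordersOf sc) ((heapOf sc).map Prod.snd) stB))).res.items.map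
      (fun p => (p.1, p.2.items)) := by
  have hinv1 := loop1_eq sc hnd (heapOf sc) stA stB (memheap sc) hinv
  have hinv2 := fold_eq sc _ _
    (fun stA stB t ht hi => step2_eq sc hnd stA stB t ht hi)
    sc.keys _ _ (fun t ht => ht) hinv1
  rw [← hinv2.2.1]
  have hinv3 := loop3_eq sc hnd
    ((sc.keys.foldl (stepA2 sc) (loopA1 sc (heapOf sc) stA)).rem.length + 1) _ _ hinv2
  rw [hinv3.1]

-- ===== VERDICT (by name: the statement is the Claim_ definition above) =====
theorem top_score_spec : Claim_equal_top_score := by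
  unfold Claim_equal_top_score Spec_top_score
  intro score _ _
  simp only [top_score, top_score_alt]
  rw [talents_eq]
  exact pipeline (pyDictOfScore score) (nodup_keys_pyDict score) _ _ (inv0 (pyDictOfScore score))
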